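-- pv_equiv track=rewrite | github.com/subhande/dsa | google_interview_questions/find_max_len_of_substr_with_fir_lex_sma_than_last.py | maxLenSubstr
-- ===== SOURCE A (Python) =====
-- def maxLenSubstr(s: str) -> int:
--     """
--     Parameters:
--         s: str -> input string
--     Returns:
--         int -> maximum length of substring with first character lexicographically smaller than last character
--     """
--     max_len = 0
--     n = len(s)
--
--     # Iterate through the string
--     for i in range(n):
--         for j in range(i + 1, n):
--             if s[i] < s[j]:
--                 max_len = max(max_len, j - i + 1)
--
--     return max_len
-- ===== SOURCE B (Python) =====
-- def maxLenSubstr(s: str) -> int: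
--     # One left-to-right pass: `first` maps each character seen so far to its
--     # earliest index.  For position j the best substring ending at j starts at
--     # the smallest first-occurrence index of a character smaller than s[j].
--     best = 0
--     first = {}
--     for j, c in enumerate(s):
--         for f, idx in first.items():
--             if f < c and j - idx + 1 > best:
--                 best = j - idx + 1
--         if c not in first:
--             first[c] = j
--     return best
-- ===== Notes on version B (the rewrite author's own statement) =====
-- stated objective: faster
-- what changed: Replaced the O(n^2) scan over all index pairs by a single left-to-right pass that keeps each character's first-occurrence index in a dict and, at each position, takes the best pair against those first occurrences (inner scan bounded by alphabet size).
import Mathlib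
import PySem

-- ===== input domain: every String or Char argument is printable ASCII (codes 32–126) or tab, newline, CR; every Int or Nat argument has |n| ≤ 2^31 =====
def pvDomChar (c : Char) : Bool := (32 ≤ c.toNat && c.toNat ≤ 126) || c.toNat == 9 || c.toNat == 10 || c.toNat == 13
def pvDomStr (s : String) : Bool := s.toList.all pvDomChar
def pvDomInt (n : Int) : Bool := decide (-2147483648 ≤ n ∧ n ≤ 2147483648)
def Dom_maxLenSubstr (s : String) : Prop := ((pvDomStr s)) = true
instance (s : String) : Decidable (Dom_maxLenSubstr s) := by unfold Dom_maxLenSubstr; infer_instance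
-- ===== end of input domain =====

-- B replaces A's O(n^2) all-pairs scan with one left-to-right pass keeping each character's
-- first-occurrence index in a dict (inner scan over ≤ alphabet-size dict entries).

-- ===== PORT A =====
-- Literal port of A's double index loop; range(i+1, n) is List.range' (i+1) (n-(i+1));
-- s[i] is List.getD (every index produced by the loops is in range, so getD is exact here).
def maxLenSubstr (s : String) : Int :=
  let l := s.toList
  let n := l.length
  (List.range n).foldl (fun m i =>
    (List.range' (i + 1) (n - (i + 1))).foldl (fun m j =>
      if l.getD i ' ' < l.getD j ' ' then max m ((j : Int) - (i : Int) + 1) else m) m) 0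

-- ===== PORT B =====
-- Literal port of Source B: fold over enumerate(s) with state (best, first); the inner loop
-- scans first.items(); `c not in first` is `¬ contains`, `first[c] = j` is insert.
def maxLenSubstr_alt (s : String) : Int :=
  (List.foldl (fun (st : Int × PySem.Dict Char Int) (p : Int × Char) =>
      let best := st.2.items.foldl (fun b fi =>
        if fi.1 < p.2 ∧ b < p.1 - fi.2 + 1 then p.1 - fi.2 + 1 else b) st.1
      let first := if st.2.contains p.2 then st.2 else st.2.insert p.2 p.1
      (best, first))
    (0, (PySem.Dict.empty : PySem.Dict Char Int)) (PySem.List.enumerate s.toList 0)).1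

-- ===== PRECONDITION & SPEC =====
def Spec_maxLenSubstr (s : String) (out : Int) : Prop := out = maxLenSubstr_alt s
instance (s : String) (out : Int) : Decidable (Spec_maxLenSubstr s out) := by unfold Spec_maxLenSubstr; infer_instance

-- ===== CLAIM (what is proved, stated in full; the proofs are below) =====
def Claim_equal_maxLenSubstr : Prop := ∀ (s : String), Dom_maxLenSubstr s → Spec_maxLenSubstr s (maxLenSubstr s)

-- ===== LEMMAS AND PROOFS =====

-- `Good l v` : v is the length of some substring of l whose first char is < its last char.
def Good (l : List Char) (v : Int) : Prop :=
  ∃ i j : Nat, i < j ∧ j < l.length ∧ l.getD i ' ' < l.getD j ' ' ∧ v = (j : Int) - (i : Int) + 1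

-- The answer both programs compute: max of 0 and all Good values.
def IsAns (l : List Char) (r : Int) : Prop :=
  0 ≤ r ∧ (r = 0 ∨ Good l r) ∧ ∀ v, Good l v → v ≤ r

lemma IsAns_unique {l : List Char} {r r' : Int} (h : IsAns l r) (h' : IsAns l r') : r = r' := by
  obtain ⟨h0, hr, hub⟩ := h
  obtain ⟨h0', hr', hub'⟩ := h'
  have h1 : r ≤ r' := by
    rcases hr with e | g
    · omega
    · exact hub' _ g
  have h2 : r' ≤ r := by
    rcases hr' with e | g
    · omega
    · exact hub _ g
  omega

-- generic facts about a "running max" fold:  step b x = if P x then max b (f x) else b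
lemma maxfold_ge {α : Type} (P : α → Prop) [DecidablePred P] (f : α → Int) :
    ∀ (L : List α) (m : Int), m ≤ L.foldl (fun b x => if P x then max b (f x) else b) m := by
  intro L
  induction L with
  | nil => intro m; simp
  | cons x xs ih =>
    intro m
    simp only [List.foldl_cons]
    refine le_trans ?_ (ih _)
    split_ifs
    · exact le_max_left _ _
    · exact le_rfl

lemma maxfold_le {α : Type} (P : α → Prop) [DecidablePred P] (f : α → Int) :
    ∀ (L : List α) (m : Int) (x : α), x ∈ L → P x →
      f x ≤ L.foldl (fun b y => if P y then max b (f y) else b) m := by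
  intro L
  induction L with
  | nil => intro m x hx; exact absurd hx (List.not_mem_nil)
  | cons y ys ih =>
    intro m x hx hP
    simp only [List.foldl_cons]
    rcases List.mem_cons.mp hx with rfl | hmem
    · refine le_trans ?_ (maxfold_ge P f ys _)
      simp [hP]
    · exact ih _ _ hmem hP

lemma maxfold_cases {α : Type} (P : α → Prop) [DecidablePred P] (f : α → Int) :
    ∀ (L : List α) (m : Int),
      L.foldl (fun b x => if P x then max b (f x) else b) m = m ∨
      ∃ x ∈ L, P x ∧ L.foldl (fun b x => if P x then max b (f x) else b) m = f x := by
  intro L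
  induction L with
  | nil => intro m; left; rfl
  | cons y ys ih =>
    intro m
    simp only [List.foldl_cons]
    rcases ih (if P y then max m (f y) else m) with h | ⟨x, hx, hP, hval⟩
    · by_cases hy : P y
      · rcases max_choice m (f y) with hm | hm
        · left; rw [h]; simp [hy, hm]
        · right; exact ⟨y, List.mem_cons_self, hy, by rw [h]; simp [hy, hm]⟩
      · left; rw [h]; simp [hy]
    · right; exact ⟨x, List.mem_cons_of_mem _ hx, hP, hval⟩

-- Good is preserved by extending the list on the right, and impossible for [].
lemma Good_append {l : List Char} {c : Char} {v : Int} (h : Good l v) : Good (l ++ [c]) v := by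
  obtain ⟨i, j, hij, hj, hlt, hv⟩ := h
  exact ⟨i, j, hij, by simp; omega,
    by rw [List.getD_append _ _ _ _ (by omega), List.getD_append _ _ _ _ hj]; exact hlt, hv⟩

lemma Good_nil {v : Int} : ¬ Good [] v := by
  rintro ⟨i, j, hij, hj, -⟩; simp at hj

-- ---------- A computes IsAns ----------

-- A's double loop is a running-max fold over the flattened list of index pairs.
def pairsOf (n : Nat) : List (Nat × Nat) :=
  (List.range n).flatMap (fun i => (List.range' (i + 1) (n - (i + 1))).map (fun j => (i, j)))

lemma mem_pairsOf {n : Nat} {p : Nat × Nat} : p ∈ pairsOf n ↔ p.1 < p.2 ∧ p.2 < n := by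
  obtain ⟨i, j⟩ := p
  simp only [pairsOf, List.mem_flatMap, List.mem_map, List.mem_range, List.mem_range'_1,
    Prod.mk.injEq]
  constructor
  · rintro ⟨a, ha, b, ⟨hb1, hb2⟩, rfl, rfl⟩; omega
  · rintro ⟨h1, h2⟩; exact ⟨i, by omega, j, by omega, rfl, rfl⟩

lemma A_eq_pairs_fold (s : String) :
    maxLenSubstr s = (pairsOf s.toList.length).foldl
      (fun m p => if s.toList.getD p.1 ' ' < s.toList.getD p.2 ' '
                  then max m ((p.2 : Int) - (p.1 : Int) + 1) else m) 0 := by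
  simp only [maxLenSubstr, pairsOf, List.foldl_flatMap, List.foldl_map]

lemma A_isAns (s : String) : IsAns s.toList (maxLenSubstr s) := by
  set l := s.toList with hl
  rw [A_eq_pairs_fold]
  set P : Nat × Nat → Prop := fun p => l.getD p.1 ' ' < l.getD p.2 ' ' with hP
  set f : Nat × Nat → Int := fun p => (p.2 : Int) - (p.1 : Int) + 1 with hf
  refine ⟨maxfold_ge P f _ 0, ?_, ?_⟩
  · rcases maxfold_cases P f (pairsOf l.length) 0 with h | ⟨x, hx, hPx, hval⟩
    · left; exact h
    · right
      rw [hval]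
      obtain ⟨h1, h2⟩ := mem_pairsOf.mp hx
      exact ⟨x.1, x.2, h1, h2, hPx, rfl⟩
  · rintro v ⟨i, j, hij, hj, hlt, rfl⟩
    exact maxfold_le P f _ 0 (i, j) (mem_pairsOf.mpr ⟨hij, hj⟩) hlt

-- ---------- B computes IsAns ----------

-- the dict invariant: `d` maps exactly the characters of the prefix `p` to their
-- first-occurrence index in `p`.
def FirstInv (p : List Char) (d : PySem.Dict Char Int) : Prop :=
  (∀ q ∈ d.items, ∃ i : Nat, q.2 = (i : Int) ∧ i < p.length ∧ p.getD i ' ' = q.1 ∧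
      ∀ k, k < i → p.getD k ' ' ≠ q.1) ∧
  (∀ i : Nat, i < p.length → ∃ q ∈ d.items, q.1 = p.getD i ' ' ∧ q.2 ≤ (i : Int))

def bStep (st : Int × PySem.Dict Char Int) (p : Int × Char) : Int × PySem.Dict Char Int :=
  (st.2.items.foldl (fun b fi =>
      if fi.1 < p.2 ∧ b < p.1 - fi.2 + 1 then p.1 - fi.2 + 1 else b) st.1,
   if st.2.contains p.2 then st.2 else st.2.insert p.2 p.1)

lemma contains_iff_items (d : PySem.Dict Char Int) (k : Char) :
    d.contains k ↔ ∃ q ∈ d.items, q.1 = k := by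
  rw [PySem.Dict.contains_iff_mem_keys]
  simp [PySem.Dict.keys, eq_comm]

lemma bStep_inv {p : List Char} {c : Char} {b : Int} {d : PySem.Dict Char Int}
    (hf : FirstInv p d) (hb : IsAns p b) :
    IsAns (p ++ [c]) (bStep (b, d) ((p.length : Int), c)).1 ∧
    FirstInv (p ++ [c]) (bStep (b, d) ((p.length : Int), c)).2 := by
  obtain ⟨hf1, hf2⟩ := hf
  obtain ⟨hb0, hbr, hub⟩ := hb
  set j : Int := (p.length : Int) with hj
  -- the inner loop is a running-max fold
  have hfold : (fun (b : Int) (fi : Char × Int) =>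
        if fi.1 < c ∧ b < j - fi.2 + 1 then j - fi.2 + 1 else b)
      = (fun (b : Int) (fi : Char × Int) =>
        if fi.1 < c then max b (j - fi.2 + 1) else b) := by
    funext b fi
    by_cases h : fi.1 < c
    · simp only [h, true_and, if_true]
      by_cases hle : j - fi.2 + 1 ≤ b
      · rw [if_neg (by omega), max_eq_left hle]
      · rw [if_pos (by omega), max_eq_right_of_lt (by omega)]
    · simp [h]
  set P : Char × Int → Prop := fun fi => fi.1 < c with hP
  set f : Char × Int → Int := fun fi => j - fi.2 + 1 with hfd
  have hb' : (bStep (b, d) (j, c)).1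
      = d.items.foldl (fun b fi => if P fi then max b (f fi) else b) b := by
    simp only [bStep, hfold]; rfl
  have hgetd : ∀ i : Nat, i < p.length → (p ++ [c]).getD i ' ' = p.getD i ' ' :=
    fun i hi => List.getD_append _ _ _ _ hi
  have hgetc : (p ++ [c]).getD p.length ' ' = c := by simp
  constructor
  · -- IsAns (p ++ [c]) best'
    rw [hb']
    refine ⟨le_trans hb0 (maxfold_ge P f _ b), ?_, ?_⟩
    · rcases maxfold_cases P f d.items b with h | ⟨q, hq, hPq, hval⟩
      · rw [h]
        rcases hbr with h0 | hg
        · left; exact h0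
        · right; exact Good_append hg
      · right
        obtain ⟨i, hqi, hilt, hpc, -⟩ := hf1 q hq
        refine ⟨i, p.length, hilt, by simp, ?_, by rw [hval]; show j - q.2 + 1 = _; omega⟩
        rw [hgetd i hilt, hgetc, hpc]
        exact hPq
    · rintro v ⟨i, j', hij', hj', hlt, rfl⟩
      have hj'len : j' < p.length + 1 := by simpa using hj'
      rcases Nat.lt_or_ge j' p.length with hcase | hcase
      · -- pair inside p
        have : Good p ((j' : Int) - (i : Int) + 1) := by
          refine ⟨i, j', hij', hcase, ?_, rfl⟩
          rw [← hgetd i (by omega), ← hgetd j' hcase]; exact hlt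
        exact le_trans (hub _ this) (maxfold_ge P f _ b)
      · -- pair ends at the new char
        have hjeq : j' = p.length := by omega
        subst hjeq
        have hilt : i < p.length := hij'
        obtain ⟨q, hq, hq1, hq2⟩ := hf2 i hilt
        have hPq : P q := by
          rw [hP]
          show q.1 < c
          rw [hq1, ← hgetd i hilt]
          rw [hgetc] at hlt
          exact hlt
        have := maxfold_le P f d.items b q hq hPq
        have hfq : f q = j - q.2 + 1 := rfl
        omega
  · -- FirstInv (p ++ [c]) first'
    have hold : ∀ q ∈ d.items, ∃ i : Nat, q.2 = (i : Int) ∧ i < (p ++ [c]).length ∧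
        (p ++ [c]).getD i ' ' = q.1 ∧ ∀ k, k < i → (p ++ [c]).getD k ' ' ≠ q.1 := by
      intro q hq
      obtain ⟨i, hqi, hilt, hpc, hfirst⟩ := hf1 q hq
      refine ⟨i, hqi, by simp; omega, by rw [hgetd i hilt]; exact hpc, ?_⟩
      intro k hk
      rw [hgetd k (by omega)]
      exact hfirst k hk
    by_cases hc : d.contains c
    · have hd' : (bStep (b, d) (j, c)).2 = d := by simp [bStep, hc]
      rw [hd']
      refine ⟨hold, ?_⟩
      intro i hi
      rcases Nat.lt_or_ge i p.length with hcase | hcase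
      · obtain ⟨q, hq, hq1, hq2⟩ := hf2 i hcase
        exact ⟨q, hq, by rw [hgetd i hcase]; exact hq1, hq2⟩
      · have : i = p.length := by simp at hi; omega
        subst this
        obtain ⟨q, hq, hq1⟩ := (contains_iff_items d c).mp hc
        obtain ⟨i', hqi', hilt', -, -⟩ := hf1 q hq
        exact ⟨q, hq, by rw [hgetc, hq1], by omega⟩
    · have hcf : d.contains c = false := by simpa using hc
      have hd' : (bStep (b, d) (j, c)).2 = d.insert c j := by simp [bStep, hcf]
      rw [hd']
      have hit : (d.insert c j).items = d.items ++ [(c, j)] :=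
        PySem.Dict.items_insert_of_not_contains d j hcf
      constructor
      · intro q hq
        rw [hit] at hq
        rcases List.mem_append.mp hq with hq | hq
        · exact hold q hq
        · have : q = (c, j) := by simpa using hq
          subst this
          refine ⟨p.length, rfl, by simp, hgetc, ?_⟩
          intro k hk heq
          rw [hgetd k hk] at heq
          obtain ⟨q', hq', hq'1, -⟩ := hf2 k hk
          exact hc ((contains_iff_items d c).mpr ⟨q', hq', by rw [hq'1, heq]⟩)
      · intro i hi
        rcases Nat.lt_or_ge i p.length with hcase | hcase
        · obtain ⟨q, hq, hq1, hq2⟩ := hf2 i hcase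
          exact ⟨q, by rw [hit]; exact List.mem_append.mpr (Or.inl hq),
            by rw [hgetd i hcase]; exact hq1, hq2⟩
        · have : i = p.length := by simp at hi; omega
          subst this
          exact ⟨(c, j), by rw [hit]; exact List.mem_append.mpr (Or.inr (by simp)),
            by rw [hgetc], le_rfl⟩

lemma B_loop (rest : List Char) :
    ∀ (p : List Char) (b : Int) (d : PySem.Dict Char Int),
      FirstInv p d → IsAns p b →
      IsAns (p ++ rest)
        ((List.foldl bStep (b, d) (PySem.List.enumerate rest (p.length : Int))).1) := by
  induction rest with
  | nil => intro p b d _ hb; simpa [PySem.List.enumerate] using hb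
  | cons c rs ih =>
    intro p b d hf hb
    rw [PySem.List.enumerate_cons, List.foldl_cons]
    obtain ⟨hb', hf'⟩ := bStep_inv hf hb
    have hlen : (p.length : Int) + 1 = ((p ++ [c]).length : Int) := by simp
    have := ih (p ++ [c]) (bStep (b, d) ((p.length : Int), c)).1
      (bStep (b, d) ((p.length : Int), c)).2 hf' hb'
    rw [hlen]
    simpa [List.append_assoc] using this

lemma B_isAns (s : String) : IsAns s.toList (maxLenSubstr_alt s) := by
  have hstep : maxLenSubstr_alt s
      = (List.foldl bStep (0, (PySem.Dict.empty : PySem.Dict Char Int))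
          (PySem.List.enumerate s.toList 0)).1 := rfl
  rw [hstep]
  have hempty : FirstInv [] (PySem.Dict.empty : PySem.Dict Char Int) := by
    constructor
    · intro q hq; exact absurd hq (by simp [PySem.Dict.empty])
    · intro i hi; simp at hi
  have h0 : IsAns ([] : List Char) 0 :=
    ⟨le_rfl, Or.inl rfl, fun v hv => absurd hv Good_nil⟩
  simpa using B_loop s.toList [] 0 _ hempty h0

-- ===== VERDICT (by name: the statement is the Claim_ definition above) =====
theorem maxLenSubstr_spec : Claim_equal_maxLenSubstr := by
  intro s _
  exact IsAns_unique (A_isAns s) (B_isAns s)
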